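-- pv_equiv track=rewrite | github.com/SailfinIO/sailfin | compiler/build/llvm/expression_lowering_stage2/core_parse.py | find_top_level_range_separator_from
-- ===== SOURCE A (Python) =====
-- def find_top_level_range_separator_from(value, start_index):
--     paren_depth = 0
--     bracket_depth = 0
--     brace_depth = 0
--     index = 0
--     while True:
--         if index >= len(value):
--             break
--         ch = value[index]
--         if ch == "(":
--             paren_depth += 1
--         else:
--             if ch == ")":
--                 if paren_depth > 0:
--                     paren_depth -= 1
--             else:
--                 if ch == "[":
--                     bracket_depth += 1
--                 else:
--                     if ch == "]":
--                         if bracket_depth > 0: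
--                             bracket_depth -= 1
--                     else:
--                         if ch == "{":
--                             brace_depth += 1
--                         else:
--                             if ch == "}":
--                                 if brace_depth > 0:
--                                     brace_depth -= 1
--         if index >= start_index:
--             if ch == ".":
--                 if index + 1 < len(value):
--                     if value[index + 1] == ".":
--                         if paren_depth == 0  and  bracket_depth == 0  and  brace_depth == 0:
--                             return index
--         index += 1
--     return -1
-- ===== SOURCE B (Python) =====
-- def _depth_flags(value):
--     p = b = r = 0
--     flags = []
--     for ch in value:
--         if ch == '(':
--             p += 1
--         elif ch == ')' and p > 0:
--             p -= 1
--         elif ch == '[':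
--             b += 1
--         elif ch == ']' and b > 0:
--             b -= 1
--         elif ch == '{':
--             r += 1
--         elif ch == '}' and r > 0:
--             r -= 1
--         flags.append(p == 0 and b == 0 and r == 0)
--     return flags
--
--
-- def find_top_level_range_separator_from(value, start_index):
--     flags = _depth_flags(value)
--     begin = max(start_index, 0)
--     for i in range(begin, len(value) - 1):
--         if value[i] == '.' and value[i + 1] == '.' and flags[i]:
--             return i
--     return -1
-- ===== Notes on version B (the rewrite author's own statement) =====
-- stated objective: alternative
-- what changed: A's single early-return scan interleaving depth tracking with the match test is split into two separate passes: one pass builds a top-level flag table over the whole string, then a plain index loop from max(start_index,0) finds the first top-level '..'.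
import Mathlib
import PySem

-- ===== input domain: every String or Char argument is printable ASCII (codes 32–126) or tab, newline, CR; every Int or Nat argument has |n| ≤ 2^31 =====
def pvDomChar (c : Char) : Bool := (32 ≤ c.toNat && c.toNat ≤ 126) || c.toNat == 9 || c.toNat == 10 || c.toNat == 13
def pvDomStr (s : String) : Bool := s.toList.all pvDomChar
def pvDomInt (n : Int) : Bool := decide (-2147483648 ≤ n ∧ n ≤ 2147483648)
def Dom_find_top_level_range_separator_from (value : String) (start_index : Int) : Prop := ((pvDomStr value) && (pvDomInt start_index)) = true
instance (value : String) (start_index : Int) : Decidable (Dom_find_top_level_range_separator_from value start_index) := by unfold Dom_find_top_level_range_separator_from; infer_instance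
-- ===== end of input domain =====

-- B replaces A's single early-return scan by two separate passes: a depth-flag table
-- built once, then a plain index search from max(start_index, 0) (objective: alternative decomposition).

-- ===== PORT A =====
-- A's while loop, transliterated: recursion over the remaining characters, carrying the
-- index and the three clamped depth counters; branch chain in A's order.
-- "index + 1 < len(value) and value[index+1] == '.'" is exactly "rest.head? = some '.'".
def goA : List Char → Int → Int → Int → Int → Int → Int
  | [], _, _, _, _, _ => -1
  | ch :: rest, index, start_index, pd, bd, brd =>
    let s' : Int × Int × Int :=
      if ch = '(' then (pd + 1, bd, brd)
      else if ch = ')' then (if pd > 0 then pd - 1 else pd, bd, brd)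
      else if ch = '[' then (pd, bd + 1, brd)
      else if ch = ']' then (pd, if bd > 0 then bd - 1 else bd, brd)
      else if ch = '{' then (pd, bd, brd + 1)
      else if ch = '}' then (pd, bd, if brd > 0 then brd - 1 else brd)
      else (pd, bd, brd)
    if index ≥ start_index ∧ ch = '.' ∧ rest.head? = some '.' ∧
        s'.1 = 0 ∧ s'.2.1 = 0 ∧ s'.2.2 = 0
    then index
    else goA rest (index + 1) start_index s'.1 s'.2.1 s'.2.2

def find_top_level_range_separator_from (value : String) (start_index : Int) : Int :=
  goA value.toList 0 start_index 0 0 0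

-- ===== PORT B =====
-- one elif-chain step of Source B's first pass
def stepB (s : Int × Int × Int) (ch : Char) : Int × Int × Int :=
  if ch = '(' then (s.1 + 1, s.2.1, s.2.2)
  else if ch = ')' ∧ s.1 > 0 then (s.1 - 1, s.2.1, s.2.2)
  else if ch = '[' then (s.1, s.2.1 + 1, s.2.2)
  else if ch = ']' ∧ s.2.1 > 0 then (s.1, s.2.1 - 1, s.2.2)
  else if ch = '{' then (s.1, s.2.1, s.2.2 + 1)
  else if ch = '}' ∧ s.2.2 > 0 then (s.1, s.2.1, s.2.2 - 1)
  else s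

-- first pass (_depth_flags): the appended flag list, built front-to-back
def buildTop : List Char → Int × Int × Int → List Bool
  | [], _ => []
  | ch :: rest, s =>
    let s' := stepB s ch
    decide (s'.1 = 0 ∧ s'.2.1 = 0 ∧ s'.2.2 = 0) :: buildTop rest s'

-- second pass: first matching index in the given index range, else -1
def searchB (cs : List Char) (top : List Bool) : List Nat → Int
  | [] => -1
  | i :: rest =>
    if cs.getD i ' ' = '.' ∧ cs.getD (i + 1) ' ' = '.' ∧ top.getD i false = true
    then (i : Int)
    else searchB cs top rest

def find_top_level_range_separator_from_alt (value : String) (start_index : Int) : Int :=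
  let cs := value.toList
  let top := buildTop cs (0, 0, 0)
  -- begin = max(start_index, 0) rendered as Int.toNat; range(begin, len(value)-1)
  searchB cs top (List.range' start_index.toNat (cs.length - 1 - start_index.toNat))

-- ===== PRECONDITION & SPEC =====
def Spec_find_top_level_range_separator_from (value : String) (start_index : Int) (out : Int) : Prop := out = find_top_level_range_separator_from_alt value start_index
instance (value : String) (start_index : Int) (out : Int) : Decidable (Spec_find_top_level_range_separator_from value start_index out) := by unfold Spec_find_top_level_range_separator_from; infer_instance

-- ===== CLAIM (what is proved, stated in full; the proofs are below) =====
def Claim_equal_find_top_level_range_separator_from : Prop := ∀ (value : String) (start_index : Int), Dom_find_top_level_range_separator_from value start_index → Spec_find_top_level_range_separator_from value start_index (find_top_level_range_separator_from value start_index)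

-- ===== LEMMAS AND PROOFS =====

-- proof-only middle form: A's scan with the start test on Nat indices and the
-- depth test read off the flag table
def sg (top : List Bool) (b : Nat) : List Char → Nat → Int
  | [], _ => -1
  | ch :: rest, k =>
    if b ≤ k ∧ ch = '.' ∧ rest.head? = some '.' ∧ top.getD k false = true
    then (k : Int)
    else sg top b rest (k + 1)

theorem drop_cons_get {cs rest : List Char} {ch : Char} {k : Nat}
    (h : cs.drop k = ch :: rest) : cs[k]? = some ch := by
  have := List.getElem?_drop (xs := cs) (i := k) (j := 0)
  rw [h] at this; simpa using this.symm

theorem drop_cons_next {cs rest : List Char} {ch : Char} {k : Nat}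
    (h : cs.drop k = ch :: rest) : cs[k+1]? = rest[0]? := by
  have := List.getElem?_drop (xs := cs) (i := k) (j := 1)
  rw [h] at this; simpa using this.symm

theorem drop_cons_tail {cs rest : List Char} {ch : Char} {k : Nat}
    (h : cs.drop k = ch :: rest) : cs.drop (k + 1) = rest := by
  have h2 : cs.drop (k+1) = (cs.drop k).drop 1 := by rw [List.drop_drop]
  simp [h2, h]

theorem drop_cons_lt {cs rest : List Char} {ch : Char} {k : Nat}
    (h : cs.drop k = ch :: rest) : k < cs.length := by
  by_contra hle
  rw [List.drop_eq_nil_of_le (by omega)] at h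
  simp at h

theorem top_getD (cs : List Char) (s : Int × Int × Int) (k : Nat) (hk : k < cs.length) :
    (buildTop cs s).getD k false
      = decide (((cs.take (k + 1)).foldl stepB s).1 = 0 ∧
                ((cs.take (k + 1)).foldl stepB s).2.1 = 0 ∧
                ((cs.take (k + 1)).foldl stepB s).2.2 = 0) := by
  induction cs generalizing s k with
  | nil => simp at hk
  | cons ch rest ih =>
    cases k with
    | zero => simp [buildTop]
    | succ k =>
      simp only [buildTop, List.getD_cons_succ, List.take_succ_cons, List.foldl_cons]
      exact ih (stepB s ch) k (by simpa using hk)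

-- A's nested branch chain computes exactly Source B's elif-chain step
theorem stepA_eq (ch : Char) (pd bd brd : Int) :
    (if ch = '(' then (pd + 1, bd, brd)
      else if ch = ')' then (if pd > 0 then pd - 1 else pd, bd, brd)
      else if ch = '[' then (pd, bd + 1, brd)
      else if ch = ']' then (pd, if bd > 0 then bd - 1 else bd, brd)
      else if ch = '{' then (pd, bd, brd + 1)
      else if ch = '}' then (pd, bd, if brd > 0 then brd - 1 else brd)
      else (pd, bd, brd) : Int × Int × Int) = stepB (pd, bd, brd) ch := by
  unfold stepB
  split_ifs <;> simp_all

theorem goA_eq_sg (start : Int) (cs : List Char) :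
    ∀ rest (k : Nat) (s : Int × Int × Int), rest = cs.drop k →
      (cs.take k).foldl stepB (0, 0, 0) = s →
      goA rest (k : Int) start s.1 s.2.1 s.2.2
        = sg (buildTop cs (0, 0, 0)) start.toNat rest k := by
  intro rest
  induction rest with
  | nil => intro k s _ _; simp [goA, sg]
  | cons ch rest' ih =>
    intro k s hdrop hst
    obtain ⟨pd, bd, brd⟩ := s
    have hk : k < cs.length := drop_cons_lt hdrop.symm
    have hget : cs[k]? = some ch := drop_cons_get hdrop.symm
    have htake : cs.take (k + 1) = cs.take k ++ [ch] := by
      rw [List.take_add_one]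
      simp [hget]
    have hfold : (cs.take (k + 1)).foldl stepB (0, 0, 0) = stepB (pd, bd, brd) ch := by
      rw [htake, List.foldl_append, hst]; rfl
    have htop : (buildTop cs (0, 0, 0)).getD k false
        = decide ((stepB (pd, bd, brd) ch).1 = 0 ∧ (stepB (pd, bd, brd) ch).2.1 = 0 ∧
                  (stepB (pd, bd, brd) ch).2.2 = 0) := by
      rw [top_getD cs (0, 0, 0) k hk, hfold]
    simp only [goA, sg, stepA_eq]
    have hcond : ((k : Int) ≥ start ∧ ch = '.' ∧ rest'.head? = some '.' ∧
          (stepB (pd, bd, brd) ch).1 = 0 ∧ (stepB (pd, bd, brd) ch).2.1 = 0 ∧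
          (stepB (pd, bd, brd) ch).2.2 = 0)
        ↔ (start.toNat ≤ k ∧ ch = '.' ∧ rest'.head? = some '.' ∧
          (buildTop cs (0, 0, 0)).getD k false = true) := by
      rw [htop]
      constructor
      · rintro ⟨h1, h2, h3, h4⟩; exact ⟨by omega, h2, h3, by simp [h4]⟩
      · rintro ⟨h1, h2, h3, h4⟩
        simp only [decide_eq_true_eq] at h4
        exact ⟨by omega, h2, h3, h4⟩
    by_cases hc : start.toNat ≤ k ∧ ch = '.' ∧ rest'.head? = some '.' ∧
        (buildTop cs (0, 0, 0)).getD k false = true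
    · rw [if_pos (hcond.mpr hc), if_pos hc]
    · rw [if_neg (fun h => hc (hcond.mp h)), if_neg hc]
      have := ih (k + 1) (stepB (pd, bd, brd) ch) (drop_cons_tail hdrop.symm).symm hfold
      simpa [Int.natCast_add] using this.symm ▸ this

theorem sg_eq_searchB (b : Nat) (cs : List Char) :
    ∀ rest (k : Nat), rest = cs.drop k →
      sg (buildTop cs (0, 0, 0)) b rest k
        = searchB cs (buildTop cs (0, 0, 0))
            (List.range' (max k b) (cs.length - 1 - max k b)) := by
  intro rest
  induction rest with
  | nil =>
    intro k hdrop
    have hlen : cs.length ≤ k := by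
      by_contra h
      have := List.drop_eq_nil_iff.mp hdrop.symm
      omega
    have : cs.length - 1 - max k b = 0 := by omega
    simp [sg, this, searchB]
  | cons ch rest' ih =>
    intro k hdrop
    have hk : k < cs.length := drop_cons_lt hdrop.symm
    have hget : cs[k]? = some ch := drop_cons_get hdrop.symm
    have htail : cs.drop (k + 1) = rest' := drop_cons_tail hdrop.symm
    by_cases hb : b ≤ k
    · have hmax : max k b = k := by omega
      rw [hmax]
      by_cases hk1 : k + 1 < cs.length
      · -- the index k is inside the searched range
        have hcnt : cs.length - 1 - k = (cs.length - 1 - (k + 1)) + 1 := by omega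
        rw [hcnt, List.range'_succ]
        simp only [searchB]
        have hnext : cs[k+1]? = rest'[0]? := drop_cons_next hdrop.symm
        obtain ⟨c2, rest'', rfl⟩ : ∃ c2 rest'', rest' = c2 :: rest'' := by
          cases h' : rest' with
          | nil => rw [← htail] at h'; have := List.drop_eq_nil_iff.mp h'; omega
          | cons c2 rest'' => exact ⟨c2, rest'', rfl⟩
        have hgd : cs.getD k ' ' = ch := by simp [List.getD, hget]
        have hgd2 : cs.getD (k + 1) ' ' = c2 := by simp [List.getD, hnext]
        have hcond : (b ≤ k ∧ ch = '.' ∧ (c2 :: rest'').head? = some '.' ∧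
              (buildTop cs (0, 0, 0)).getD k false = true)
            ↔ (cs.getD k ' ' = '.' ∧ cs.getD (k + 1) ' ' = '.' ∧
              (buildTop cs (0, 0, 0)).getD k false = true) := by
          rw [hgd, hgd2]
          constructor
          · rintro ⟨_, h2, h3, h4⟩; simp at h3; exact ⟨h2, h3, h4⟩
          · rintro ⟨h2, h3, h4⟩; exact ⟨hb, h2, by simp [h3], h4⟩
        simp only [sg]
        by_cases hc : cs.getD k ' ' = '.' ∧ cs.getD (k + 1) ' ' = '.' ∧
            (buildTop cs (0, 0, 0)).getD k false = true
        · rw [if_pos (hcond.mpr hc), if_pos hc]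
        · rw [if_neg (fun h => hc (hcond.mp h)), if_neg hc]
          have := ih (k + 1) htail.symm
          rwa [show max (k + 1) b = k + 1 by omega] at this
      · -- k is the last character: no room for "..", and the range is empty
        have hr : rest' = [] := by
          rw [← htail]; exact List.drop_eq_nil_of_le (by omega)
        have hcnt : cs.length - 1 - k = 0 := by omega
        simp [sg, hr, hcnt, searchB]
    · -- k < b: A only updates depths here; the searched range starts at b either way
      have hmax : max k b = b := by omega
      have hmax2 : max (k + 1) b = b := by omega
      have hcondF : ¬ (b ≤ k ∧ ch = '.' ∧ rest'.head? = some '.' ∧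
          (buildTop cs (0, 0, 0)).getD k false = true) := fun h => hb h.1
      simp only [sg, if_neg hcondF]
      have := ih (k + 1) htail.symm
      rw [hmax2] at this
      rw [hmax, this]

-- ===== VERDICT (by name: the statement is the Claim_ definition above) =====
theorem find_top_level_range_separator_from_spec : Claim_equal_find_top_level_range_separator_from := by
  intro value start_index _
  unfold Spec_find_top_level_range_separator_from
  unfold find_top_level_range_separator_from find_top_level_range_separator_from_alt
  have h1 := goA_eq_sg start_index value.toList value.toList 0 (0, 0, 0) rfl rfl
  have h2 := sg_eq_searchB start_index.toNat value.toList value.toList 0 rfl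
  rw [show ((0 : Nat) : Int) = 0 from rfl] at h1
  rw [show max 0 start_index.toNat = start_index.toNat by omega] at h2
  simp only [h1, h2]
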